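-- pv_equiv track=rewrite | github.com/BishwashKumarSah/VSCODE-Codeforces | A_Sakurako_and_Kosuke.py | solve
-- ===== SOURCE A (Python) =====
-- def solve(val):
--     cur = 0
--     turn = 0
--     count = 1
--     while abs(cur) <= val:
--         i = (2 * count) - 1
--         if turn == 0:
--             cur += -1 * i
--         else:
--             cur += i
--         if abs(cur) > val:
--             if turn == 0:
--                 return "Sakurako"
--             return "Kosuke"
--         if turn == 0:
--             turn = 1
--         else:
--             turn = 0
--         count += 1
-- ===== SOURCE B (Python) =====
-- def solve(val):
--     # Closed form: after each pair of steps the position alternates -k, +k with |cur| = k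
--     # after k steps, so the walk first exceeds val on step val+1, taken by Sakurako when
--     # val is even and by Kosuke when val is odd.
--     return "Sakurako" if val % 2 == 0 else "Kosuke"
-- ===== Notes on version B (the rewrite author's own statement) =====
-- stated objective: faster
-- what changed: replaces the O(val) step-by-step walk simulation with an O(1) parity formula (winner = Sakurako iff val is even)
-- outside the precondition, e.g. on solve(-1): A returns None, B returns 'Kosuke'
import Mathlib
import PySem

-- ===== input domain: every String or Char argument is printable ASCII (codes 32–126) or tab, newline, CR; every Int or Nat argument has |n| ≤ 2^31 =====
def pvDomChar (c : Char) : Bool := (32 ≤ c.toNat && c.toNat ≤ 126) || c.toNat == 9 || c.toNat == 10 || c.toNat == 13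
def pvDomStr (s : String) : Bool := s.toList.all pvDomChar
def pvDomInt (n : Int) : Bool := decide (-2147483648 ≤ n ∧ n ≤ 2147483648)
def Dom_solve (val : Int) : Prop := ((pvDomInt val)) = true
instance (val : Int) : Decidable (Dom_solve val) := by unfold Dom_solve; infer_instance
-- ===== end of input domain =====

-- B replaces A's O(val) step-by-step walk simulation by the O(1) parity formula.

-- ===== PORT A =====
-- literal port of A's while loop; the fuel argument only makes the recursion total
-- (fuel val.toNat + 2 always suffices, since the loop runs at most val+1 iterations)
def solveLoop (fuel : Nat) (val cur turn count : Int) : String :=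
  match fuel with
  | 0 => ""  -- never reached with the fuel solve supplies
  | f + 1 =>
    if (cur.natAbs : Int) ≤ val then
      let i := 2 * count - 1
      let cur' := if turn = 0 then cur + (-1) * i else cur + i
      if val < (cur'.natAbs : Int) then
        if turn = 0 then "Sakurako" else "Kosuke"
      else
        solveLoop f val cur' (if turn = 0 then 1 else 0) (count + 1)
    else ""  -- while loop falls through: Python returns None (excluded by Pre_solve)

def solve (val : Int) : String := solveLoop (val.toNat + 2) val 0 0 1

-- ===== PORT B =====
def solve_alt (val : Int) : String :=
  if PySem.Int.mod val 2 = 0 then "Sakurako" else "Kosuke"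

-- ===== PRECONDITION & SPEC =====
-- Pre_ excludes val < 0, where A's while loop is never entered and Python returns None
-- (not a string), so A returns no value of the declared type there.
def Pre_solve (val : Int) : Prop := 0 ≤ val
instance (val : Int) : Decidable (Pre_solve val) := by unfold Pre_solve; infer_instance
def pvWitness_solve : Int := (3)

def Spec_solve (val : Int) (out : String) : Prop := out = solve_alt val
instance (val : Int) (out : String) : Decidable (Spec_solve val out) := by unfold Spec_solve; infer_instance

-- ===== CLAIM (what is proved, stated in full; the proofs are below) =====
def Claim_equal_solve : Prop := ∀ (val : Int), Dom_solve val → Pre_solve val → Spec_solve val (solve val)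

-- ===== LEMMAS AND PROOFS =====

-- invariant: at the start of iteration k (0-indexed), cur = (-1)^k·k, turn = k%2, count = k+1
theorem solveLoop_inv (fuel : Nat) : ∀ (k : Nat) (val : Int),
    (k : Int) ≤ val → val < (fuel : Int) + k →
    solveLoop fuel val (if k % 2 = 0 then (k : Int) else -(k : Int))
      (if k % 2 = 0 then 0 else 1) (k + 1)
      = (if PySem.Int.mod val 2 = 0 then "Sakurako" else "Kosuke") := by
  induction fuel with
  | zero => intro k val hk hfk; simp at hfk; omega
  | succ f ih =>
    intro k val hk hfk
    by_cases hpar : k % 2 = 0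
    · simp only [hpar, solveLoop, reduceIte]
      rw [if_pos (by simp; omega)]
      have hcur' : (k : Int) + (-1) * (2 * ((k : Int) + 1) - 1) = -((k : Int) + 1) := by ring
      rw [hcur']
      have habs' : ((Int.natAbs (-((k : Int) + 1))) : Int) = (k : Int) + 1 := by
        rw [Int.natAbs_neg]; simp; omega
      rw [habs']
      by_cases hend : val < (k : Int) + 1
      · rw [if_pos hend]
        have hval : val = (k : Int) := by omega
        subst hval
        have hm : PySem.Int.mod ((k : Int)) 2 = 0 := by
          rw [PySem.Int.mod_eq_emod_of_pos (by norm_num)]; omega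
        rw [if_pos hm]
      · rw [if_neg hend]
        have hk1 : (k + 1) % 2 ≠ 0 := by omega
        have := ih (k + 1) val (by omega) (by push_cast; push_cast at hfk; omega)
        rw [if_neg hk1, if_neg hk1] at this
        simpa using this
    · simp only [hpar, solveLoop, reduceIte]
      have h2 : ((Int.natAbs (-(k : Int))) : Int) = (k : Int) := by
        rw [Int.natAbs_neg]; simp
      rw [if_pos (by rw [h2]; exact hk)]
      have ht : ¬((1 : Int) = 0) := by norm_num
      simp only [if_neg ht]
      have hcur' : -(k : Int) + (2 * ((k : Int) + 1) - 1) = (k : Int) + 1 := by ring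
      rw [hcur']
      have habs' : ((Int.natAbs ((k : Int) + 1)) : Int) = (k : Int) + 1 := by
        simp; omega
      rw [habs']
      by_cases hend : val < (k : Int) + 1
      · rw [if_pos hend]
        have hval : val = (k : Int) := by omega
        subst hval
        have : PySem.Int.mod (k : Int) 2 ≠ 0 := by
          rw [PySem.Int.mod_eq_emod_of_pos (by norm_num)]; omega
        rw [if_neg this]
      · rw [if_neg hend]
        have hk1 : (k + 1) % 2 = 0 := by omega
        have := ih (k + 1) val (by omega) (by push_cast; push_cast at hfk; omega)
        rw [if_pos hk1, if_pos hk1] at this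
        simpa using this

-- ===== VERDICT (by name: the statement is the Claim_ definition above) =====
theorem solve_spec : Claim_equal_solve := by
  intro val _ hpre
  unfold Spec_solve solve solve_alt
  have := solveLoop_inv (val.toNat + 2) 0 val (by exact_mod_cast hpre)
    (by push_cast; omega)
  simpa using this
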